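-- pv_equiv track=rewrite | github.com/DPNT-Sourcecode/CHK-jpaw01 | lib/solutions/CHK/checkout_solution.py | remove_free_items
-- ===== SOURCE A (Python) =====
-- from typing import List
--
-- free_items_offer = {
--     "E": [(2, "B")],
--     "F": [(3, "F")],
--     "N": [(3, "M")],
--     "R": [(3, "Q")],
--     "U": [(4, "U")],
-- }
--
-- def remove_free_items(skus: List[str]) -> List[str]:
--     free_items = []
--     for free_item in free_items_offer.keys():
--         if free_item in skus:
--             c = skus.count(free_item)
--             free_item_threshold = free_items_offer[free_item][0][0]
--             free_item_qty = c // free_item_threshold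
--             free_items.extend([free_items_offer[free_item][0][1]] * free_item_qty)
--
--     free_items = sorted(free_items)
--     for fi in free_items:
--         if fi in skus:
--             i = skus.index(fi)
--             skus[i] = ""
--
--     return sorted([x for x in skus if x != ""])
-- ===== SOURCE B (Python) =====
-- from typing import List
--
-- free_items_offer = {
--     "E": [(2, "B")],
--     "F": [(3, "F")],
--     "N": [(3, "M")],
--     "R": [(3, "Q")],
--     "U": [(4, "U")],
-- }
--
-- def remove_free_items(skus: List[str]) -> List[str]:
--     # one budgeted forward pass instead of repeated skus.index scans
--     budget = {}
--     for trigger, offers in free_items_offer.items():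
--         threshold, target = offers[0]
--         budget[target] = skus.count(trigger) // threshold
--     for i, x in enumerate(skus):
--         if budget.get(x, 0) > 0:
--             skus[i] = ""
--             budget[x] -= 1
--     return sorted(x for x in skus if x != "")
-- ===== Notes on version B (the rewrite author's own statement) =====
-- stated objective: alternative
-- what changed: Replaces A's construction of a sorted free-items list followed by repeated 'fi in skus' / skus.index scans with a removal-budget dict computed once from the original counts and a single budgeted forward pass over skus that blanks the same positions.
import Mathlib
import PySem

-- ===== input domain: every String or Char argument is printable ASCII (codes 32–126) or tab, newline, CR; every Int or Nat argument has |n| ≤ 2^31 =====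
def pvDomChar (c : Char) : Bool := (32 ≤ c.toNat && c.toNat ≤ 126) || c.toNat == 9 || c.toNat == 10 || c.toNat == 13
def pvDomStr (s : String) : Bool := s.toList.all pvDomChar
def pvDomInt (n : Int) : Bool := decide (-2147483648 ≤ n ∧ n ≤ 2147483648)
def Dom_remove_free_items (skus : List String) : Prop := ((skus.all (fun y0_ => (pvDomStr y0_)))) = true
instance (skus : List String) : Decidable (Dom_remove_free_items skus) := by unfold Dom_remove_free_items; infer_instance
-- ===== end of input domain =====

-- B replaces A's sorted free-items list plus repeated skus.index scans by a precomputed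
-- removal-budget dict and one budgeted forward pass (objective: alternative decomposition).
-- A mutates its argument in place (blanking entries); B performs the same mutation; the
-- equivalence proved here is about the RETURN value.


-- module-level constant shared by both Pythons
def freeItemsOffer : PySem.Dict String (List (Int × String)) :=
  PySem.Dict.ofList [("E", [(2, "B")]), ("F", [(3, "F")]), ("N", [(3, "M")]),
                     ("R", [(3, "Q")]), ("U", [(4, "U")])]

-- ===== PORT A =====
def remove_free_items (skus : List String) : List String :=
  let free_items : List String := freeItemsOffer.keys.foldl (fun acc free_item =>
    if free_item ∈ skus then
      let c : Int := (PySem.List.count skus free_item : Int)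
      let entry := (freeItemsOffer.getD free_item []).getD 0 (0, "")
      let free_item_qty := PySem.Int.floordiv c entry.1
      acc ++ PySem.List.pyRepeat [entry.2] free_item_qty
    else acc) []
  let free_items := PySem.List.sorted free_items (fun x => x) false
  let skus := free_items.foldl (fun s fi =>
    if fi ∈ s then
      match PySem.List.index? s fi with
      | some i => s.set i ""
      | none => s
    else s) skus
  PySem.List.sorted (skus.filter (fun x => x ≠ "")) (fun x => x) false

-- ===== PORT B =====
-- the single budgeted forward pass over skus
def pvBlankPass (budget : PySem.Dict String Int) : List String → List String
  | [] => []
  | x :: xs =>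
    if budget.getD x 0 > 0 then
      "" :: pvBlankPass (budget.insert x (budget.getD x 0 - 1)) xs
    else
      x :: pvBlankPass budget xs

def remove_free_items_alt (skus : List String) : List String :=
  let budget : PySem.Dict String Int := freeItemsOffer.items.foldl (fun d p =>
    let threshold := (p.2.getD 0 (0, "")).1
    let target := (p.2.getD 0 (0, "")).2
    d.insert target (PySem.Int.floordiv (PySem.List.count skus p.1 : Int) threshold)) PySem.Dict.empty
  let skus := pvBlankPass budget skus
  PySem.List.sorted (skus.filter (fun x => x ≠ "")) (fun x => x) false

-- ===== PRECONDITION & SPEC =====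
def Spec_remove_free_items (skus : List String) (out : List String) : Prop := out = remove_free_items_alt skus
instance (skus : List String) (out : List String) : Decidable (Spec_remove_free_items skus out) := by unfold Spec_remove_free_items; infer_instance

-- ===== CLAIM (what is proved, stated in full; the proofs are below) =====
def Claim_equal_remove_free_items : Prop := ∀ (skus : List String), Dom_remove_free_items skus → Spec_remove_free_items skus (remove_free_items skus)

-- ===== LEMMAS AND PROOFS =====

-- blank the first n occurrences of t
def pvBlankN (t : String) (n : Nat) : List String → List String
  | [] => []
  | x :: xs => if x = t ∧ n ≠ 0 then "" :: pvBlankN t (n - 1) xs else x :: pvBlankN t n xs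

theorem pvBlankN_zero (t : String) (l : List String) : pvBlankN t 0 l = l := by
  induction l with
  | nil => rfl
  | cons x xs ih => simp [pvBlankN, ih]

-- blanking first occurrence once = pvBlankN t 1
theorem pvBlank1_eq (t : String) (l : List String) :
    (if t ∈ l then
      match PySem.List.index? l t with
      | some i => l.set i ""
      | none => l
    else l) = pvBlankN t 1 l := by
  induction l with
  | nil => simp [pvBlankN]
  | cons x xs ih =>
    by_cases hx : x = t
    · subst hx
      rw [PySem.List.index?_cons_self]
      simp [pvBlankN, pvBlankN_zero]
    · by_cases hm : t ∈ xs
      · have hm' : t ∈ x :: xs := List.mem_cons_of_mem _ hm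
        rw [if_pos hm', PySem.List.index?_cons_of_ne xs hx]
        obtain ⟨i, hi⟩ := Option.isSome_iff_exists.mp
          ((PySem.List.index?_isSome_iff (xs := xs) (v := t)).mpr hm)
        rw [if_pos hm, hi] at ih
        rw [hi]
        simp only [Option.map_some, List.set_cons_succ]
        simp only [pvBlankN, hx, false_and, if_false]
        exact congrArg _ ih
      · have hm' : t ∉ x :: xs := by
          simp only [List.mem_cons, not_or]
          exact ⟨fun h => hx h.symm, hm⟩
        rw [if_neg hm] at ih
        rw [if_neg hm']
        simp only [pvBlankN, hx, false_and, if_false]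
        exact congrArg _ ih

theorem pvBlankN_comp (t : String) (ht : t ≠ "") (a b : Nat) (l : List String) :
    pvBlankN t a (pvBlankN t b l) = pvBlankN t (a + b) l := by
  induction l generalizing a b with
  | nil => rfl
  | cons x xs ih =>
    by_cases hx : x = t
    · subst hx
      rcases Nat.eq_zero_or_pos b with hb | hb
      · subst hb
        rcases Nat.eq_zero_or_pos a with ha | ha
        · simp [ha, pvBlankN_zero]
        · simp [pvBlankN, Nat.pos_iff_ne_zero.mp ha, ih]
      · simp [pvBlankN, Nat.pos_iff_ne_zero.mp hb, Ne.symm ht, ih,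
          Nat.add_sub_assoc (Nat.one_le_iff_ne_zero.mpr (Nat.pos_iff_ne_zero.mp hb))]
    · simp [pvBlankN, hx, ih]

-- fold of the per-item blank over n copies of t = pvBlankN t n
theorem pvFold_replicate (t : String) (ht : t ≠ "") (n : Nat) (l : List String) :
    (List.replicate n t).foldl (fun s fi =>
      if fi ∈ s then
        match PySem.List.index? s fi with
        | some i => s.set i ""
        | none => s
      else s) l = pvBlankN t n l := by
  induction n generalizing l with
  | zero => simp [pvBlankN_zero]
  | succ n ih =>
    rw [List.replicate_succ, List.foldl_cons, ih, pvBlank1_eq]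
    rw [pvBlankN_comp t ht]
    
-- functional form of the budget pass
def pvPassF (f : String → Int) : List String → List String
  | [] => []
  | x :: xs => if f x > 0 then "" :: pvPassF (fun y => if y = x then f x - 1 else f y) xs
               else x :: pvPassF f xs

theorem pvPassF_congr (f g : String → Int) (h : ∀ y, f y = g y) (l : List String) :
    pvPassF f l = pvPassF g l := by
  induction l generalizing f g with
  | nil => rfl
  | cons x xs ih =>
    simp only [pvPassF, h x]
    split_ifs with hx
    · exact congrArg _ (ih _ _ (fun y => by by_cases hy : y = x <;> simp [hy, h]))
    · exact congrArg _ (ih _ _ h)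

theorem pvPassF_zero (l : List String) : pvPassF (fun _ => 0) l = l := by
  induction l with
  | nil => rfl
  | cons x xs ih => simp [pvPassF, ih]

theorem pvBlankPass_eq (d : PySem.Dict String Int) (l : List String) :
    pvBlankPass d l = pvPassF (fun x => d.getD x 0) l := by
  induction l generalizing d with
  | nil => rfl
  | cons x xs ih =>
    simp only [pvBlankPass, pvPassF]
    split_ifs with hx
    · refine congrArg _ ?_
      rw [ih]
      exact pvPassF_congr _ _ (fun y => by rw [PySem.Dict.getD_insert]) xs
    · exact congrArg _ (ih d)

-- key lemma: one more budgeted target = pvBlankN after the smaller pass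
theorem pvPassF_update (t : String) (ht : t ≠ "") (f : String → Int) (hf : f t = 0)
    (q : Nat) (l : List String) :
    pvPassF (fun y => if y = t then (q : Int) else f y) l = pvBlankN t q (pvPassF f l) := by
  induction l generalizing f q with
  | nil => rfl
  | cons x xs ih =>
    by_cases hx : x = t
    · subst hx
      rcases Nat.eq_zero_or_pos q with hq | hq
      · subst hq
        have h1 : pvPassF (fun y => if y = x then ((0:Nat) : Int) else f y) (x :: xs)
             = pvPassF f (x :: xs) :=
          pvPassF_congr _ _ (fun y => by by_cases hy : y = x <;> simp [hy, hf]) _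
        rw [h1, pvBlankN_zero]
      · have hq0 : ((q : Int) > 0) := by exact_mod_cast hq
        simp only [pvPassF, if_true]
        rw [if_pos hq0, if_neg (by rw [hf]; omega)]
        simp only [pvBlankN, true_and, if_pos (Nat.pos_iff_ne_zero.mp hq)]
        refine congrArg _ ?_
        rw [← ih f hf (q - 1)]
        refine pvPassF_congr _ _ (fun y => ?_) xs
        have hc : ((q - 1 : Nat) : Int) = (q : Int) - 1 := by omega
        by_cases hy : y = x <;> simp [hy, hc]
    · have hft : (if x = t then ((q:Nat) : Int) else f x) = f x := by simp [hx]
      simp only [pvPassF, hft]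
      split_ifs with hfx
      · rw [pvBlankN, if_neg (by rintro ⟨h1, -⟩; exact ht h1.symm)]
        refine congrArg _ ?_
        have h2 : pvPassF (fun y => if y = x then f x - 1 else if y = t then (q:Int) else f y) xs
            = pvPassF (fun y => if y = t then (q:Int) else (if y = x then f x - 1 else f y)) xs := by
          refine pvPassF_congr _ _ (fun y => ?_) xs
          by_cases hy : y = x
          · simp [hy, hx]
          · simp [hy]
        rw [h2, ih _ (by simp only [if_neg (fun h : t = x => hx h.symm)]; exact hf) q]
      · simp only [pvBlankN, hx, false_and, if_false]
        exact congrArg _ (ih f hf q)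

-- one offer step of A's first loop: append count//m copies of t (empty when k absent)
theorem pvStep (skus : List String) (k t : String) (acc : List String) (m : Int) (hm : 0 < m) :
    (if k ∈ skus then acc ++ PySem.List.pyRepeat [t]
        (PySem.Int.floordiv ((PySem.List.count skus k : Nat) : Int) m) else acc)
    = acc ++ List.replicate (PySem.List.count skus k / m.toNat) t := by
  obtain ⟨n, rfl⟩ : ∃ n : Nat, m = (n : Int) := ⟨m.toNat, (Int.toNat_of_nonneg hm.le).symm⟩
  rw [PySem.List.pyRepeat_singleton, PySem.Int.floordiv_natCast, Int.toNat_natCast,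
    Int.toNat_natCast]
  split_ifs with h
  · rfl
  · have h0 : PySem.List.count skus k = 0 := by
      rw [PySem.List.count_eq]; exact List.count_eq_zero.mpr h
    rw [h0, Nat.zero_div, List.replicate_zero, List.append_nil]

-- the five-block free-items list is already sorted
theorem pvPairwise_chain (a b c d e : Nat) :
    List.Pairwise (fun x y : String => x ≤ y)
      (List.replicate a "B" ++ (List.replicate b "F" ++ (List.replicate c "M" ++
        (List.replicate d "Q" ++ List.replicate e "U")))) := by
  simp only [List.pairwise_append, List.pairwise_replicate, List.mem_replicate,
    List.mem_append]
  refine ⟨Or.inr le_rfl, ⟨Or.inr le_rfl, ⟨Or.inr le_rfl, ⟨Or.inr le_rfl, Or.inr le_rfl,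
    ?_⟩, ?_⟩, ?_⟩, ?_⟩ <;>
  · intro x hx y hy
    obtain ⟨-, rfl⟩ := hx
    first
    | (rcases hy with ⟨-, rfl⟩ | ⟨-, rfl⟩ | ⟨-, rfl⟩ | ⟨-, rfl⟩)
    | (rcases hy with ⟨-, rfl⟩ | ⟨-, rfl⟩ | ⟨-, rfl⟩)
    | (rcases hy with ⟨-, rfl⟩ | ⟨-, rfl⟩)
    | (obtain ⟨-, rfl⟩ := hy)
    all_goals exact le_of_lt (by
      rw [String.lt_iff_toList_lt]; exact List.Lex.rel (by decide))

theorem pvA_char (skus : List String) :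
    remove_free_items skus = PySem.List.sorted
      ((pvBlankN "U" (PySem.List.count skus "U" / 4)
        (pvBlankN "Q" (PySem.List.count skus "R" / 3)
          (pvBlankN "M" (PySem.List.count skus "N" / 3)
            (pvBlankN "F" (PySem.List.count skus "F" / 3)
              (pvBlankN "B" (PySem.List.count skus "E" / 2) skus))))).filter
        (fun x => x ≠ "")) (fun x => x) false := by
  simp only [remove_free_items]
  have hk : freeItemsOffer.keys = ["E", "F", "N", "R", "U"] := rfl
  rw [hk]
  simp only [List.foldl_cons, List.foldl_nil]
  have hE : (freeItemsOffer.getD "E" []).getD 0 ((0:Int), "") = ((2:Int), "B") := rfl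
  have hF : (freeItemsOffer.getD "F" []).getD 0 ((0:Int), "") = ((3:Int), "F") := rfl
  have hN : (freeItemsOffer.getD "N" []).getD 0 ((0:Int), "") = ((3:Int), "M") := rfl
  have hR : (freeItemsOffer.getD "R" []).getD 0 ((0:Int), "") = ((3:Int), "Q") := rfl
  have hU : (freeItemsOffer.getD "U" []).getD 0 ((0:Int), "") = ((4:Int), "U") := rfl
  rw [hE, hF, hN, hR, hU]
  dsimp only
  rw [pvStep skus "E" "B" [] 2 (by norm_num)]
  rw [pvStep skus "F" "F" _ 3 (by norm_num)]
  rw [pvStep skus "N" "M" _ 3 (by norm_num)]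
  rw [pvStep skus "R" "Q" _ 3 (by norm_num)]
  rw [pvStep skus "U" "U" _ 4 (by norm_num)]
  simp only [List.nil_append, show Int.toNat 2 = 2 from rfl, show Int.toNat 3 = 3 from rfl,
    show Int.toNat 4 = 4 from rfl, List.append_assoc]
  rw [PySem.List.sorted_eq_self_of_pairwise _ _
    (pvPairwise_chain (PySem.List.count skus "E" / 2) (PySem.List.count skus "F" / 3)
      (PySem.List.count skus "N" / 3) (PySem.List.count skus "R" / 3)
      (PySem.List.count skus "U" / 4))]
  rw [List.foldl_append, List.foldl_append, List.foldl_append, List.foldl_append]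
  rw [pvFold_replicate "B" (by decide), pvFold_replicate "F" (by decide),
    pvFold_replicate "M" (by decide), pvFold_replicate "Q" (by decide),
    pvFold_replicate "U" (by decide)]

theorem pvB_char (skus : List String) :
    remove_free_items_alt skus = PySem.List.sorted
      ((pvBlankN "U" (PySem.List.count skus "U" / 4)
        (pvBlankN "Q" (PySem.List.count skus "R" / 3)
          (pvBlankN "M" (PySem.List.count skus "N" / 3)
            (pvBlankN "F" (PySem.List.count skus "F" / 3)
              (pvBlankN "B" (PySem.List.count skus "E" / 2) skus))))).filter
        (fun x => x ≠ "")) (fun x => x) false := by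
  simp only [remove_free_items_alt]
  have hi : freeItemsOffer.items = [("E", [((2:Int), "B")]), ("F", [((3:Int), "F")]),
      ("N", [((3:Int), "M")]), ("R", [((3:Int), "Q")]), ("U", [((4:Int), "U")])] := rfl
  rw [hi]
  simp only [List.foldl_cons, List.foldl_nil]
  simp only [List.getD, List.getElem?_cons_zero, Option.getD_some]
  have hv2 : ∀ c : Nat, PySem.Int.floordiv (c : Int) (2:Int) = ((c / 2 : Nat) : Int) :=
    fun c => by exact_mod_cast PySem.Int.floordiv_natCast c 2
  have hv3 : ∀ c : Nat, PySem.Int.floordiv (c : Int) (3:Int) = ((c / 3 : Nat) : Int) :=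
    fun c => by exact_mod_cast PySem.Int.floordiv_natCast c 3
  have hv4 : ∀ c : Nat, PySem.Int.floordiv (c : Int) (4:Int) = ((c / 4 : Nat) : Int) :=
    fun c => by exact_mod_cast PySem.Int.floordiv_natCast c 4
  rw [pvBlankPass_eq]
  simp only [hv2, hv3, hv4, PySem.Dict.getD_insert, PySem.Dict.getD_empty]
  rw [pvPassF_update "U" (by decide) _ (by simp) _,
    pvPassF_update "Q" (by decide) _ (by simp) _,
    pvPassF_update "M" (by decide) _ (by simp) _,
    pvPassF_update "F" (by decide) _ (by simp) _,
    pvPassF_update "B" (by decide) _ (by simp) _,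
    pvPassF_zero]

-- ===== VERDICT (by name: the statement is the Claim_ definition above) =====
theorem remove_free_items_spec : Claim_equal_remove_free_items := by
  intro skus _
  unfold Spec_remove_free_items
  rw [pvA_char, pvB_char]
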